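-- pv_equiv track=rewrite | github.com/HarshaGitZone/GeoNexusAI | reports/pdf_generator.py | _get_factor_list_in_ui_order
-- ===== SOURCE A (Python) =====
-- CATEGORY_ORDER = [
--     "physical",
--     "hydrology",
--     "environmental",
--     "climatic",
--     "socio_econ",
--     "risk_resilience",
-- ]
--
-- FACTOR_ORDER_BY_CATEGORY = {
--     "physical": ["elevation", "ruggedness", "slope", "stability"],
--     "environmental": ["biodiversity", "heat_island", "pollution", "soil", "vegetation"],
--     "hydrology": ["drainage", "flood", "groundwater", "water"],
--     "climatic": ["intensity", "rainfall", "thermal"],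
--     "socio_econ": ["infrastructure", "landuse", "population"],
--     "risk_resilience": ["climate_change", "habitability", "multi_hazard", "recovery"],
-- }
--
-- def _get_factor_list_in_ui_order(data):
--     raw = data.get("factors", {}) or {}
--     ordered = []
--
--     for cat in CATEGORY_ORDER:
--         cat_data = raw.get(cat) or {}
--         if not isinstance(cat_data, dict):
--             continue
--         keys = FACTOR_ORDER_BY_CATEGORY.get(cat, list(cat_data.keys()))
--         for k in keys:
--             if k in cat_data:
--                 ordered.append(k)
--
--     # Add any extras at end (rare)
--     for cat, cat_data in raw.items():
--         if not isinstance(cat_data, dict):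
--             continue
--         for k in cat_data.keys():
--             if k not in ordered:
--                 ordered.append(k)
--
--     return ordered
-- ===== SOURCE B (Python) =====
-- CATEGORY_ORDER = [
--     "physical",
--     "hydrology",
--     "environmental",
--     "climatic",
--     "socio_econ",
--     "risk_resilience",
-- ]
--
-- FACTOR_ORDER_BY_CATEGORY = {
--     "physical": ["elevation", "ruggedness", "slope", "stability"],
--     "environmental": ["biodiversity", "heat_island", "pollution", "soil", "vegetation"],
--     "hydrology": ["drainage", "flood", "groundwater", "water"],
--     "climatic": ["intensity", "rainfall", "thermal"],
--     "socio_econ": ["infrastructure", "landuse", "population"],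
--     "risk_resilience": ["climate_change", "habitability", "multi_hazard", "recovery"],
-- }
--
-- # Precomputed once: global UI rank of each known factor, and the category it belongs to.
-- RANK = {f: i for i, f in enumerate(
--     f for c in CATEGORY_ORDER for f in FACTOR_ORDER_BY_CATEGORY[c])}
-- CAT_OF = {f: c for c in CATEGORY_ORDER for f in FACTOR_ORDER_BY_CATEGORY[c]}
--
-- def _get_factor_list_in_ui_order(data):
--     raw = data.get("factors", {}) or {}
--     # Phase 1: one pass over the input, keep the known factors filed under their
--     # own category, then order them by their precomputed global rank.
--     known = [k for cat, cat_data in raw.items() if isinstance(cat_data, dict)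
--              for k in cat_data if k in RANK and CAT_OF[k] == cat]
--     known.sort(key=RANK.__getitem__)
--     # Phase 2: extras, deduplicated with a seen-set instead of list membership.
--     seen = set(known)
--     out = known
--     for cat_data in raw.values():
--         if not isinstance(cat_data, dict):
--             continue
--         for k in cat_data:
--             if k not in seen:
--                 seen.add(k)
--                 out.append(k)
--     return out
-- ===== Notes on version B (the rewrite author's own statement) =====
-- stated objective: alternative
-- what changed: Phase 1 no longer scans the category/factor templates: one pass over raw.items() collects the keys known to a precomputed RANK/CAT_OF table (filed under their own category) and a sort by global rank restores the UI order; the extras pass replaces the quadratic 'k not in ordered' list test with a seen-set.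
import Mathlib
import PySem

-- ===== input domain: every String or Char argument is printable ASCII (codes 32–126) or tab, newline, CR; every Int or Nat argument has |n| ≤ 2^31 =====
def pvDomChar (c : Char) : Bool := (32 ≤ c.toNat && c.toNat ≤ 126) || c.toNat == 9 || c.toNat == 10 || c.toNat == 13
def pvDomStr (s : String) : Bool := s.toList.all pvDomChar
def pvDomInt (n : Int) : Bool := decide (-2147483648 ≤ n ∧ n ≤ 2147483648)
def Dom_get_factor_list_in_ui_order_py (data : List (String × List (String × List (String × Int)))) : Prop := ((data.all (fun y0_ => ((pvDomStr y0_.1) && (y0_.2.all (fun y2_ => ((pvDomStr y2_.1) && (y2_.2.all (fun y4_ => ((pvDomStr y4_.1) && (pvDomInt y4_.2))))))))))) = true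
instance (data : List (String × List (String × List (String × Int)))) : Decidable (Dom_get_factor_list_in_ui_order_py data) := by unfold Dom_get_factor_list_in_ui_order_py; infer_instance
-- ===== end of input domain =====

-- B replaces A's template scan with a precomputed rank table: one pass over the input
-- collects the known factors, a sort by global rank restores the UI order, and a seen-set
-- replaces the quadratic `k not in ordered` list test in the extras pass (objective: alternative).

-- ===== PORT A =====
-- The Python argument is a dict (of dicts of dicts); under the assoc-list convention we
-- realise Python's dict semantics (duplicate keys: last value wins, first position kept)
-- with PySem.Dict.ofList.  Both ports decode the argument with this same helper.
def pvRaw (data : List (String × List (String × List (String × Int)))) : PySem.Dict String (PySem.Dict String Int) :=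
  PySem.Dict.ofList ((((PySem.Dict.ofList data).get? "factors").getD []).map (fun p => (p.1, PySem.Dict.ofList p.2)))

def CATEGORY_ORDER : List String :=
  ["physical", "hydrology", "environmental", "climatic", "socio_econ", "risk_resilience"]

def FACTOR_ORDER_BY_CATEGORY : PySem.Dict String (List String) := PySem.Dict.ofList
  [("physical", ["elevation", "ruggedness", "slope", "stability"]),
   ("environmental", ["biodiversity", "heat_island", "pollution", "soil", "vegetation"]),
   ("hydrology", ["drainage", "flood", "groundwater", "water"]),
   ("climatic", ["intensity", "rainfall", "thermal"]),
   ("socio_econ", ["infrastructure", "landuse", "population"]),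
   ("risk_resilience", ["climate_change", "habitability", "multi_hazard", "recovery"])]

-- `raw.get(cat) or {}` : a missing key (None) becomes {}; a falsy value is already {}.
-- `isinstance(cat_data, dict)` is always true under the typed convention (values are dicts).
def get_factor_list_in_ui_order_py (data : List (String × List (String × List (String × Int)))) : List String :=
  let raw := pvRaw data
  let ordered := CATEGORY_ORDER.foldl (fun ordered cat =>
    let cat_data := (raw.get? cat).getD PySem.Dict.empty
    let keys := (FACTOR_ORDER_BY_CATEGORY.get? cat).getD cat_data.keys
    keys.foldl (fun o k => if cat_data.contains k then o ++ [k] else o) ordered) []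
  raw.items.foldl (fun o p =>
    p.2.keys.foldl (fun o k => if o.contains k then o else o ++ [k]) o) ordered

-- ===== PORT B =====
-- module-level precomputation of Source B: RANK = global UI index, CAT_OF = owning category
def UI_FACTORS : List String :=
  CATEGORY_ORDER.flatMap (fun c => (FACTOR_ORDER_BY_CATEGORY.get? c).getD [])

def RANK : PySem.Dict String Int :=
  PySem.Dict.ofList ((PySem.List.enumerate UI_FACTORS).map (fun p => (p.2, p.1)))

def CAT_OF : PySem.Dict String String :=
  PySem.Dict.ofList (CATEGORY_ORDER.flatMap (fun c =>
    ((FACTOR_ORDER_BY_CATEGORY.get? c).getD []).map (fun f => (f, c))))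

-- `known.sort(key=RANK.__getitem__)`: every collected k is in RANK, so RANK[k] = getD k 0.
def get_factor_list_in_ui_order_py_alt (data : List (String × List (String × List (String × Int)))) : List String :=
  let raw := pvRaw data
  let known := raw.items.foldl (fun acc p =>
    acc ++ p.2.keys.filter (fun k => RANK.contains k && (CAT_OF.get? k == some p.1))) []
  let known := PySem.List.sorted known (fun k => RANK.getD k 0)
  let res := raw.items.foldl (fun so p =>
    p.2.keys.foldl (fun so k =>
      if so.2.contains k then so else (so.1 ++ [k], so.2.add k)) so)
    (known, PySem.Set.ofList known)
  res.1

-- ===== PRECONDITION & SPEC =====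
def Spec_get_factor_list_in_ui_order_py (data : List (String × List (String × List (String × Int)))) (out : List String) : Prop := out = get_factor_list_in_ui_order_py_alt data
instance (data : List (String × List (String × List (String × Int)))) (out : List String) : Decidable (Spec_get_factor_list_in_ui_order_py data out) := by unfold Spec_get_factor_list_in_ui_order_py; infer_instance

-- ===== CLAIM (what is proved, stated in full; the proofs are below) =====
def Claim_equal_get_factor_list_in_ui_order_py : Prop := ∀ (data : List (String × List (String × List (String × Int)))), Dom_get_factor_list_in_ui_order_py data → Spec_get_factor_list_in_ui_order_py data (get_factor_list_in_ui_order_py data)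

-- ===== LEMMAS AND PROOFS =====

-- the 24 (category, factor) pairs in UI order
def P24 : List (String × String) :=
  [("physical","elevation"),("physical","ruggedness"),("physical","slope"),("physical","stability"),
   ("hydrology","drainage"),("hydrology","flood"),("hydrology","groundwater"),("hydrology","water"),
   ("environmental","biodiversity"),("environmental","heat_island"),("environmental","pollution"),
   ("environmental","soil"),("environmental","vegetation"),
   ("climatic","intensity"),("climatic","rainfall"),("climatic","thermal"),
   ("socio_econ","infrastructure"),("socio_econ","landuse"),("socio_econ","population"),
   ("risk_resilience","climate_change"),("risk_resilience","habitability"),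
   ("risk_resilience","multi_hazard"),("risk_resilience","recovery")]

theorem hCat : ∀ q ∈ P24, CAT_OF.get? q.2 = some q.1 ∧ RANK.contains q.2 = true := by decide

theorem hRankKeys : RANK.keys = P24.map (·.2) := by decide

theorem hPsndNodup : (P24.map (·.2)).Nodup := by decide

theorem hPkey : P24.Pairwise (fun q q' => RANK.getD q.2 0 < RANK.getD q'.2 0) := by decide

-- the guard of B's comprehension characterised by membership in P24
theorem mem_P_iff (c k : String) :
    (RANK.contains k && (CAT_OF.get? k == some c)) = true ↔ (c, k) ∈ P24 := by
  constructor
  · intro h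
    rw [Bool.and_eq_true] at h
    have hk : k ∈ P24.map (·.2) := by
      rw [← hRankKeys]
      exact (PySem.Dict.contains_iff_mem_keys RANK k).mp h.1
    rcases List.mem_map.mp hk with ⟨q, hq, hq2⟩
    have := (hCat q hq).1
    rw [hq2] at this
    have hc : CAT_OF.get? k == some c := h.2
    rw [this] at hc
    have : q.1 = c := by simpa using hc
    have : (c, k) = q := by rw [← this, ← hq2]
    rw [this]; exact hq
  · intro h
    have h2 := hCat (c, k) h
    simp [h2.1, h2.2]

theorem P_fst_unique {c c' k : String} (h : (c, k) ∈ P24) (h' : (c', k) ∈ P24) : c = c' := by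
  have e1 := (hCat (c, k) h).1
  have e2 := (hCat (c', k) h').1
  simp only at e1 e2
  rw [e1] at e2
  exact (Option.some.injEq _ _).mp e2

-- values appearing in d.update L are old values or values of L
theorem values_update {κ ν : Type} [BEq κ] [LawfulBEq κ] (L : List (κ × ν)) :
    ∀ (d : PySem.Dict κ ν), ∀ w ∈ (d.update L).values, w ∈ d.values ∨ w ∈ L.map (·.2) := by
  induction L with
  | nil => intro d w hw; exact Or.inl hw
  | cons q L ih =>
      intro d w hw
      have : PySem.Dict.update d (q :: L) = PySem.Dict.update (d.insert q.1 q.2) L := rfl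
      rw [this] at hw
      rcases ih (d.insert q.1 q.2) w hw with h | h
      · rcases PySem.Dict.mem_values_insert _ _ _ _ h with h | h
        · exact Or.inr (by rw [List.map_cons, h]; exact List.mem_cons_self ..)
        · exact Or.inl h
      · exact Or.inr (by rw [List.map_cons]; exact List.mem_cons_of_mem _ h)

theorem pvRaw_value_nodup (data : List (String × List (String × List (String × Int)))) :
    ∀ p ∈ (pvRaw data).items, p.2.keys.Nodup := by
  intro p hp
  have hv : p.2 ∈ (pvRaw data).values := List.mem_map_of_mem hp
  rw [show pvRaw data = PySem.Dict.empty.update ((((PySem.Dict.ofList data).get? "factors").getD []).map (fun p => (p.1, PySem.Dict.ofList p.2))) from rfl] at hv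
  rcases values_update _ PySem.Dict.empty p.2 hv with h | h
  · simp [PySem.Dict.empty, PySem.Dict.values] at h
  · rcases List.mem_map.mp h with ⟨r, hr, hrr⟩
    rcases List.mem_map.mp hr with ⟨u, _, hu⟩
    have : p.2 = PySem.Dict.ofList u.2 := by rw [← hrr, ← hu]
    rw [this]
    exact PySem.Dict.nodup_keys_ofList u.2

-- Phase 1 of A as a filter of the literal pair list
theorem seg1 (raw : PySem.Dict String (PySem.Dict String Int)) :
    (([("physical","elevation"),("physical","ruggedness"),("physical","slope"),("physical","stability")].filter (fun q => ((raw.get? q.1).getD PySem.Dict.empty).contains q.2))).map (fun q : String × String => q.2)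
    = ["elevation","ruggedness","slope","stability"].filter (fun k => ((raw.get? "physical").getD PySem.Dict.empty).contains k) := by
  simp only [List.filter_cons, List.filter_nil]
  split_ifs <;> rfl

theorem seg2 (raw : PySem.Dict String (PySem.Dict String Int)) :
    (([("hydrology","drainage"),("hydrology","flood"),("hydrology","groundwater"),("hydrology","water")].filter (fun q => ((raw.get? q.1).getD PySem.Dict.empty).contains q.2))).map (fun q : String × String => q.2)
    = ["drainage","flood","groundwater","water"].filter (fun k => ((raw.get? "hydrology").getD PySem.Dict.empty).contains k) := by
  simp only [List.filter_cons, List.filter_nil]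
  split_ifs <;> rfl

theorem seg3 (raw : PySem.Dict String (PySem.Dict String Int)) :
    (([("environmental","biodiversity"),("environmental","heat_island"),("environmental","pollution"),("environmental","soil"),("environmental","vegetation")].filter (fun q => ((raw.get? q.1).getD PySem.Dict.empty).contains q.2))).map (fun q : String × String => q.2)
    = ["biodiversity","heat_island","pollution","soil","vegetation"].filter (fun k => ((raw.get? "environmental").getD PySem.Dict.empty).contains k) := by
  simp only [List.filter_cons, List.filter_nil]
  split_ifs <;> rfl

theorem seg4 (raw : PySem.Dict String (PySem.Dict String Int)) :
    (([("climatic","intensity"),("climatic","rainfall"),("climatic","thermal")].filter (fun q => ((raw.get? q.1).getD PySem.Dict.empty).contains q.2))).map (fun q : String × String => q.2)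
    = ["intensity","rainfall","thermal"].filter (fun k => ((raw.get? "climatic").getD PySem.Dict.empty).contains k) := by
  simp only [List.filter_cons, List.filter_nil]
  split_ifs <;> rfl

theorem seg5 (raw : PySem.Dict String (PySem.Dict String Int)) :
    (([("socio_econ","infrastructure"),("socio_econ","landuse"),("socio_econ","population")].filter (fun q => ((raw.get? q.1).getD PySem.Dict.empty).contains q.2))).map (fun q : String × String => q.2)
    = ["infrastructure","landuse","population"].filter (fun k => ((raw.get? "socio_econ").getD PySem.Dict.empty).contains k) := by
  simp only [List.filter_cons, List.filter_nil]
  split_ifs <;> rfl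

theorem seg6 (raw : PySem.Dict String (PySem.Dict String Int)) :
    (([("risk_resilience","climate_change"),("risk_resilience","habitability"),("risk_resilience","multi_hazard"),("risk_resilience","recovery")].filter (fun q => ((raw.get? q.1).getD PySem.Dict.empty).contains q.2))).map (fun q : String × String => q.2)
    = ["climate_change","habitability","multi_hazard","recovery"].filter (fun k => ((raw.get? "risk_resilience").getD PySem.Dict.empty).contains k) := by
  simp only [List.filter_cons, List.filter_nil]
  split_ifs <;> rfl

theorem seg_eq (raw : PySem.Dict String (PySem.Dict String Int)) :
    (P24.filter (fun q => ((raw.get? q.1).getD PySem.Dict.empty).contains q.2)).map (·.2)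
    = (["elevation","ruggedness","slope","stability"].filter (fun k => ((raw.get? "physical").getD PySem.Dict.empty).contains k)
      ++ (["drainage","flood","groundwater","water"].filter (fun k => ((raw.get? "hydrology").getD PySem.Dict.empty).contains k)
      ++ (["biodiversity","heat_island","pollution","soil","vegetation"].filter (fun k => ((raw.get? "environmental").getD PySem.Dict.empty).contains k)
      ++ (["intensity","rainfall","thermal"].filter (fun k => ((raw.get? "climatic").getD PySem.Dict.empty).contains k)
      ++ (["infrastructure","landuse","population"].filter (fun k => ((raw.get? "socio_econ").getD PySem.Dict.empty).contains k)
      ++ (["climate_change","habitability","multi_hazard","recovery"].filter (fun k => ((raw.get? "risk_resilience").getD PySem.Dict.empty).contains k))))))) := by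
  rw [show P24 = [("physical","elevation"),("physical","ruggedness"),("physical","slope"),("physical","stability")] ++ ([("hydrology","drainage"),("hydrology","flood"),("hydrology","groundwater"),("hydrology","water")] ++ ([("environmental","biodiversity"),("environmental","heat_island"),("environmental","pollution"),("environmental","soil"),("environmental","vegetation")] ++ ([("climatic","intensity"),("climatic","rainfall"),("climatic","thermal")] ++ ([("socio_econ","infrastructure"),("socio_econ","landuse"),("socio_econ","population")] ++ ([("risk_resilience","climate_change"),("risk_resilience","habitability"),("risk_resilience","multi_hazard"),("risk_resilience","recovery")]))))) from rfl]
  simp only [List.filter_append, List.map_append]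
  rw [seg1, seg2, seg3, seg4, seg5, seg6]

theorem phase1_eq (raw : PySem.Dict String (PySem.Dict String Int)) :
    CATEGORY_ORDER.foldl (fun ordered cat =>
      let cat_data := (raw.get? cat).getD PySem.Dict.empty
      let keys := (FACTOR_ORDER_BY_CATEGORY.get? cat).getD cat_data.keys
      keys.foldl (fun o k => if cat_data.contains k then o ++ [k] else o) ordered) []
    = (P24.filter (fun q => ((raw.get? q.1).getD PySem.Dict.empty).contains q.2)).map (·.2) := by
  rw [seg_eq]
  simp only [CATEGORY_ORDER, List.foldl_cons, List.foldl_nil]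
  rw [show FACTOR_ORDER_BY_CATEGORY.get? "physical" = some ["elevation","ruggedness","slope","stability"] from by decide,
      show FACTOR_ORDER_BY_CATEGORY.get? "hydrology" = some ["drainage","flood","groundwater","water"] from by decide,
      show FACTOR_ORDER_BY_CATEGORY.get? "environmental" = some ["biodiversity","heat_island","pollution","soil","vegetation"] from by decide,
      show FACTOR_ORDER_BY_CATEGORY.get? "climatic" = some ["intensity","rainfall","thermal"] from by decide,
      show FACTOR_ORDER_BY_CATEGORY.get? "socio_econ" = some ["infrastructure","landuse","population"] from by decide,
      show FACTOR_ORDER_BY_CATEGORY.get? "risk_resilience" = some ["climate_change","habitability","multi_hazard","recovery"] from by decide]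
  simp only [Option.getD_some, PySem.List.foldl_append_if_eq_filter, List.nil_append, List.append_assoc]

-- phase 2: list-membership loop of A = seen-set loop of B (first components agree)
theorem phase2_inner (ks : List String) :
    ∀ (o : List String) (s : PySem.Set String), (∀ x, x ∈ s ↔ x ∈ o) →
    (ks.foldl (fun o k => if o.contains k then o else o ++ [k]) o
      = (ks.foldl (fun so k => if so.2.contains k then so else (so.1 ++ [k], so.2.add k)) (o, s)).1)
    ∧ (∀ x, x ∈ (ks.foldl (fun so k => if so.2.contains k then so else (so.1 ++ [k], so.2.add k)) (o, s)).2
        ↔ x ∈ ks.foldl (fun o k => if o.contains k then o else o ++ [k]) o) := by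
  induction ks with
  | nil => intro o s h; exact ⟨rfl, h⟩
  | cons k ks ih =>
      intro o s h
      simp only [List.foldl_cons]
      have hc : s.contains k = o.contains k := by
        by_cases hk : k ∈ o
        · simp [hk, (h k).mpr hk]
        · have : ¬ k ∈ s := fun hs => hk ((h k).mp hs)
          simp [hk, this]
      by_cases hcase : o.contains k = true
      · simp only [hc, hcase, if_true]
        exact ih o s h
      · simp only [hc, hcase, if_false, Bool.false_eq_true]
        refine ih (o ++ [k]) (s.add k) (fun x => ?_)
        rw [PySem.Set.mem_add]
        simp [h x]

theorem phase2_eq (items : List (String × PySem.Dict String Int)) :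
    ∀ (o : List String) (s : PySem.Set String), (∀ x, x ∈ s ↔ x ∈ o) →
    items.foldl (fun o p =>
      p.2.keys.foldl (fun o k => if o.contains k then o else o ++ [k]) o) o
    = (items.foldl (fun so p =>
        p.2.keys.foldl (fun so k =>
          if so.2.contains k then so else (so.1 ++ [k], so.2.add k)) so) (o, s)).1 := by
  induction items with
  | nil => intro o s _; rfl
  | cons p items ih =>
      intro o s h
      simp only [List.foldl_cons]
      obtain ⟨h1, h2⟩ := phase2_inner p.2.keys o s h
      rcases hst : p.2.keys.foldl (fun so k => if so.2.contains k then so else (so.1 ++ [k], so.2.add k)) (o, s) with ⟨o', s'⟩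
      rw [h1, hst]
      exact ih o' s' (fun x => by
        have hx := h2 x
        rw [h1, hst] at hx
        exact hx)

theorem sorted_eq (raw : PySem.Dict String (PySem.Dict String Int))
    (h1 : raw.keys.Nodup) (h2 : ∀ p ∈ raw.items, p.2.keys.Nodup) :
    PySem.List.sorted
      (raw.items.foldl (fun acc p =>
        acc ++ p.2.keys.filter (fun k => RANK.contains k && (CAT_OF.get? k == some p.1))) [])
      (fun k => RANK.getD k 0)
    = (P24.filter (fun q => ((raw.get? q.1).getD PySem.Dict.empty).contains q.2)).map (·.2) := by
  rw [PySem.List.foldl_append_eq_flatMap, List.nil_append]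
  have hfst : raw.items.Pairwise (fun p q => p.1 ≠ q.1) := by
    have : (raw.items.map Prod.fst).Nodup := h1
    exact List.pairwise_map.mp this
  have hN1 : ((P24.filter (fun q => ((raw.get? q.1).getD PySem.Dict.empty).contains q.2)).map (·.2)).Nodup :=
    List.Nodup.sublist (List.Sublist.map _ List.filter_sublist) hPsndNodup
  have hN2 : (raw.items.flatMap (fun p =>
      p.2.keys.filter (fun k => RANK.contains k && (CAT_OF.get? k == some p.1)))).Nodup := by
    refine List.nodup_flatMap.mpr ⟨fun p hp => (h2 p hp).filter _, ?_⟩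
    refine hfst.imp ?_
    intro p q hne k hkp hkq
    have hp24 := (mem_P_iff p.1 k).mp (List.mem_filter.mp hkp).2
    have hq24 := (mem_P_iff q.1 k).mp (List.mem_filter.mp hkq).2
    exact hne (P_fst_unique hp24 hq24)
  apply PySem.List.sorted_eq_of_perm_of_pairwise_lt
  · rw [List.perm_ext_iff_of_nodup hN1 hN2]
    intro k
    simp only [List.mem_map, List.mem_filter, List.mem_flatMap]
    constructor
    · rintro ⟨q, ⟨hq, hf⟩, rfl⟩
      rcases hr : raw.get? q.1 with _ | d
      · rw [hr] at hf
        simp [PySem.Dict.empty, PySem.Dict.contains] at hf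
      · rw [hr, Option.getD_some] at hf
        refine ⟨(q.1, d), (PySem.Dict.get?_eq_some_iff_mem_items raw q.1 d h1).mp hr, ?_, ?_⟩
        · exact (PySem.Dict.contains_iff_mem_keys d q.2).mp hf
        · exact (mem_P_iff q.1 q.2).mpr (by rw [Prod.mk.eta]; exact hq)
    · rintro ⟨p, hp, hk, hpred⟩
      have hp24 := (mem_P_iff p.1 k).mp hpred
      refine ⟨(p.1, k), ⟨hp24, ?_⟩, rfl⟩
      rw [(PySem.Dict.get?_eq_some_iff_mem_items raw p.1 p.2 h1).mpr hp, Option.getD_some]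
      exact (PySem.Dict.contains_iff_mem_keys p.2 k).mpr hk
  · exact List.pairwise_map.mpr (List.Pairwise.sublist List.filter_sublist hPkey)

-- ===== VERDICT (by name: the statement is the Claim_ definition above) =====
theorem get_factor_list_in_ui_order_py_spec : Claim_equal_get_factor_list_in_ui_order_py := by
  intro data _
  unfold Spec_get_factor_list_in_ui_order_py
  unfold get_factor_list_in_ui_order_py get_factor_list_in_ui_order_py_alt
  simp only
  rw [phase1_eq (pvRaw data), sorted_eq (pvRaw data) (PySem.Dict.nodup_keys_ofList _) (pvRaw_value_nodup data)]
  exact phase2_eq (pvRaw data).items _ _ (fun x => PySem.Set.mem_ofList _ x)
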